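-- pv_equiv track=rewrite | github.com/dyuhti/Design-And-Analysis-Of-Algorithm | assignment/assignment8/1.py | find_odd_string
-- ===== SOURCE A (Python) =====
-- def find_odd_string(words):
--     for word in words:
--         diff_array = [ord(word[i + 1]) - ord(word[i]) for i in range(len(word) - 1)]
--         count = 0
--         for w in words:
--             if w != word:
--                 if [ord(w[i + 1]) - ord(w[i]) for i in range(len(w) - 1)] == diff_array:
--                     count += 1
--         if count == 0:
--             return word
-- ===== SOURCE B (Python) =====
-- def find_odd_string(words):
--     def sig(w):
--         return tuple(ord(b) - ord(a) for a, b in zip(w, w[1:]))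
--     groups = {}
--     for w in words:
--         groups.setdefault(sig(w), set()).add(w)
--     for w in words:
--         if len(groups[sig(w)]) == 1:
--             return w
-- ===== Notes on version B (the rewrite author's own statement) =====
-- stated objective: faster
-- what changed: Replaces A's O(n^2*L) all-pairs comparison of difference arrays with one pass that groups words in a dict keyed by their difference tuple (sets of distinct words), then returns the first word whose group contains only itself.
import Mathlib
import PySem

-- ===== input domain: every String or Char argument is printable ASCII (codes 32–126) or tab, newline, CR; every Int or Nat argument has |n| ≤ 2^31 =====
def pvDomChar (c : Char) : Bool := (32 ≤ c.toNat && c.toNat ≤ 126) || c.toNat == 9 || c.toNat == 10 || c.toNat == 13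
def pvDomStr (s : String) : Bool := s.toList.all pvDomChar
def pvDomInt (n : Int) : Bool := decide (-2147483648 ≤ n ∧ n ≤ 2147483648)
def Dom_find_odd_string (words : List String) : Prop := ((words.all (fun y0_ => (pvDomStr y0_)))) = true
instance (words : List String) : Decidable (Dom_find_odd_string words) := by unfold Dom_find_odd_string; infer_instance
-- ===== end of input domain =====

-- B replaces A's quadratic all-pairs comparison by one dict pass grouping the words
-- by their difference tuple, then returns the first word whose group holds one distinct word.

-- ===== PORT A =====
-- ord c
def pvOrd (c : Char) : Int := c.toNat

-- [ord(word[i+1]) - ord(word[i]) for i in range(len(word) - 1)]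
-- (indices i and i+1 always lie in range 0..len-1, so the getD default is never used; exact)
def pvDiffA (w : String) : List Int :=
  (PySem.List.pyRange 0 (PySem.Str.len w - 1)).map
    (fun i => pvOrd (PySem.List.pyGetD w.toList (i + 1) 'A') - pvOrd (PySem.List.pyGetD w.toList i 'A'))

-- the outer 'for word in words: … if count == 0: return word' loop of A
def pvGoA (words : List String) : List String → Option String
  | [] => none
  | word :: rest =>
    let diff_array := pvDiffA word
    let count : Int := words.foldl
      (fun c w => if w ≠ word then (if pvDiffA w = diff_array then c + 1 else c) else c) 0
    if count = 0 then some word else pvGoA words rest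

def find_odd_string (words : List String) : Option String := pvGoA words words

-- ===== PORT B =====
-- tuple(ord(b) - ord(a) for a, b in zip(w, w[1:]))
def pvSig (w : String) : List Int :=
  (w.toList.zip (PySem.List.slice w.toList (some 1) none)).map (fun p => pvOrd p.2 - pvOrd p.1)

-- groups.setdefault(sig(w), set()).add(w)
def pvStepB (d : PySem.Dict (List Int) (PySem.Set String)) (w : String) :
    PySem.Dict (List Int) (PySem.Set String) :=
  d.modify (pvSig w) PySem.Set.empty (fun s => PySem.Set.add s w)

def pvGroups (words : List String) : PySem.Dict (List Int) (PySem.Set String) :=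
  words.foldl pvStepB PySem.Dict.empty

-- the second loop of B: first w with len(groups[sig(w)]) == 1
def pvGoB (g : PySem.Dict (List Int) (PySem.Set String)) : List String → Option String
  | [] => none
  | w :: rest =>
    if PySem.Set.len (g.getD (pvSig w) PySem.Set.empty) = 1 then some w else pvGoB g rest

def find_odd_string_alt (words : List String) : Option String := pvGoB (pvGroups words) words

-- ===== PRECONDITION & SPEC =====
def Spec_find_odd_string (words : List String) (out : Option String) : Prop := out = find_odd_string_alt words
instance (words : List String) (out : Option String) : Decidable (Spec_find_odd_string words out) := by unfold Spec_find_odd_string; infer_instance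

-- ===== CLAIM (what is proved, stated in full; the proofs are below) =====
def Claim_equal_find_odd_string : Prop := ∀ (words : List String), Dom_find_odd_string words → Spec_find_odd_string words (find_odd_string words)

-- ===== LEMMAS AND PROOFS =====

-- the difference list over List Char, index form = zip form
lemma pvListDiff (cs : List Char) :
    (List.range (cs.length - 1)).map
      (fun i => pvOrd (cs.getD (i + 1) 'A') - pvOrd (cs.getD i 'A'))
    = (cs.zip (cs.drop 1)).map (fun p => pvOrd p.2 - pvOrd p.1) := by
  induction cs with
  | nil => simp
  | cons a t ih =>
    cases t with
    | nil => simp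
    | cons b u =>
      have h := ih
      simp only [List.length_cons, Nat.add_sub_cancel, List.drop_one, List.tail_cons] at h ⊢
      rw [List.range_succ_eq_map]
      simp only [List.map_cons, List.map_map, List.drop_one, List.tail_cons,
        List.zip_cons_cons, List.getD_cons_succ, List.getD_cons_zero]
      refine congrArg₂ _ rfl ?_
      rw [← h]
      apply List.map_congr_left
      intro i hi
      simp [Function.comp, List.getD_cons_succ]

-- A's diff array equals B's signature
lemma pvDiff_eq_sig (w : String) : pvDiffA w = pvSig w := by
  unfold pvDiffA pvSig
  have hs : PySem.List.slice w.toList (some 1) none = w.toList.drop 1 := by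
    simp [pysem]
  rw [hs]
  have hlen : PySem.Str.len w = (w.toList.length : Int) := by
    simp [pysem]
  rw [hlen]
  cases hcs : w.toList with
  | nil => simp [PySem.List.pyRange]
  | cons a t =>
    have : ((a :: t : List Char).length : Int) - 1 = ((t.length : Nat) : Int) := by
      simp
    rw [this, PySem.List.pyRange_zero_natCast, List.map_map]
    have : (a :: t).length - 1 = t.length := by simp
    rw [← pvListDiff (a :: t), this]
    apply List.map_congr_left
    intro k hk
    simp only [Function.comp]
    have h1 : ((k : Int) + 1) = ((k + 1 : Nat) : Int) := by push_cast; ring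
    rw [h1, PySem.List.pyGetD_natCast, PySem.List.pyGetD_natCast]

-- the group a key s holds after B's building loop
lemma pvGroups_getD (l : List String) (d : PySem.Dict (List Int) (PySem.Set String)) (s : List Int) :
    (l.foldl pvStepB d).getD s PySem.Set.empty
      = (l.filter (fun w => pvSig w == s)).foldl PySem.Set.add (d.getD s PySem.Set.empty) := by
  induction l generalizing d with
  | nil => simp
  | cons w t ih =>
    simp only [List.foldl_cons, List.filter_cons]
    rw [ih]
    unfold pvStepB
    rw [PySem.Dict.getD_modify]
    by_cases h : pvSig w = s
    · subst h
      simp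
    · simp [h, Ne.symm h]

lemma pvGroup_ofList (words : List String) (s : List Int) :
    (pvGroups words).getD s PySem.Set.empty
      = PySem.Set.ofList (words.filter (fun w => pvSig w == s)) := by
  unfold pvGroups
  rw [pvGroups_getD, PySem.Set.ofList_eq_foldl]
  rfl

-- the property both loops test: word's signature determines word among words
def pvUniq (words : List String) (word : String) : Prop :=
  ∀ w ∈ words, pvSig w = pvSig word → w = word

-- B's condition ↔ pvUniq
lemma pvCondB_iff (words : List String) (word : String) (hmem : word ∈ words) :
    PySem.Set.len ((pvGroups words).getD (pvSig word) PySem.Set.empty) = 1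
      ↔ pvUniq words word := by
  rw [pvGroup_ofList]
  set fl := words.filter (fun w => pvSig w == pvSig word) with hfl
  have hwfl : word ∈ fl := by
    rw [hfl, List.mem_filter]; exact ⟨hmem, by simp⟩
  have hmemo : ∀ x, x ∈ PySem.Set.ofList fl ↔ x ∈ fl := fun x => PySem.Set.mem_ofList fl x
  have hlen : PySem.Set.len (PySem.Set.ofList fl) = ((PySem.Set.ofList fl).length : Int) := by
    simp [PySem.Set.len]
  rw [hlen]
  constructor
  · intro h w hw hsig
    have h1 : (PySem.Set.ofList fl).length = 1 := by exact_mod_cast h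
    obtain ⟨a, ha⟩ := List.length_eq_one_iff.mp h1
    have hwa : word = a := by
      have := (hmemo word).mpr hwfl; rw [ha] at this; simpa using this
    have hwfl' : w ∈ fl := by
      rw [hfl, List.mem_filter]; exact ⟨hw, by simp [hsig]⟩
    have := (hmemo w).mpr hwfl'; rw [ha] at this
    simp at this; rw [this, hwa]
  · intro h
    have hall : ∀ x ∈ PySem.Set.ofList fl, x = word := by
      intro x hx
      have hx' := (hmemo x).mp hx
      rw [hfl, List.mem_filter] at hx'
      exact h x hx'.1 (by simpa using hx'.2)
    have hnd : (PySem.Set.ofList fl).Nodup := PySem.Set.nodup_ofList fl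
    have hwm : word ∈ PySem.Set.ofList fl := (hmemo word).mpr hwfl
    cases hset : PySem.Set.ofList fl with
    | nil => rw [hset] at hwm; simp at hwm
    | cons a u =>
      rw [hset] at hall hnd
      have ha : a = word := hall a (by simp)
      have hu : u = [] := by
        cases u with
        | nil => rfl
        | cons b v =>
          have hb : b = word := hall b (by simp)
          rw [List.nodup_cons] at hnd
          exact absurd (by simp [ha, hb] : a ∈ b :: v) hnd.1
      simp [hu]

-- A's count ↔ pvUniq (after identifying diff arrays with signatures)
lemma pvCondA_iff (words : List String) (word : String) :
    (words.foldl
      (fun c w => if w ≠ word then (if pvDiffA w = pvDiffA word then c + 1 else c) else c) (0 : Int)) = 0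
      ↔ pvUniq words word := by
  have hstep : (fun (c : Int) (w : String) =>
      if w ≠ word then (if pvDiffA w = pvDiffA word then c + 1 else c) else c)
      = (fun (c : Int) (w : String) =>
      if (w ≠ word ∧ pvSig w = pvSig word) then c + 1 else c) := by
    funext c w
    rw [pvDiff_eq_sig w, pvDiff_eq_sig word]
    by_cases h1 : w ≠ word
    · by_cases h2 : pvSig w = pvSig word
      · rw [if_pos h1, if_pos h2, if_pos ⟨h1, h2⟩]
      · rw [if_pos h1, if_neg h2, if_neg (fun h => h2 h.2)]
    · rw [if_neg h1, if_neg (fun h => h1 h.1)]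
  rw [hstep, PySem.List.foldl_ite_add_one]
  simp only [zero_add]
  rw [show ((words.countP fun x => decide (x ≠ word ∧ pvSig x = pvSig word)) : Int) = 0
      ↔ (words.countP fun x => decide (x ≠ word ∧ pvSig x = pvSig word)) = 0 by exact_mod_cast Iff.rfl]
  rw [List.countP_eq_zero]
  unfold pvUniq
  constructor
  · intro h w hw hs
    by_contra hne
    exact (by simpa using h w hw : ¬(w ≠ word ∧ pvSig w = pvSig word)) ⟨hne, hs⟩
  · intro h w hw
    simp only [decide_eq_true_eq, not_and]
    intro hne hs
    exact hne (h w hw hs)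

-- the two scans agree
lemma pvGo_eq (words : List String) (l : List String) (hsub : ∀ x ∈ l, x ∈ words) :
    pvGoA words l = pvGoB (pvGroups words) l := by
  induction l with
  | nil => rfl
  | cons word rest ih =>
    have hmem : word ∈ words := hsub word (by simp)
    have hA := pvCondA_iff words word
    have hB := pvCondB_iff words word hmem
    unfold pvGoA pvGoB
    by_cases hp : pvUniq words word
    · rw [if_pos (hA.mpr hp), if_pos (hB.mpr hp)]
    · rw [if_neg (fun h => hp (hA.mp h)), if_neg (fun h => hp (hB.mp h))]
      exact ih (fun x hx => hsub x (by simp [hx]))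

-- ===== VERDICT (by name: the statement is the Claim_ definition above) =====
theorem find_odd_string_spec : Claim_equal_find_odd_string := by
  intro words _
  unfold Spec_find_odd_string find_odd_string find_odd_string_alt
  exact pvGo_eq words words (fun x hx => hx)
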